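-- pv_equiv track=rewrite | github.com/luisagd/neerandu | scripts/parse_dictionary.py | getmeaning
-- ===== SOURCE A (Python) =====
-- import unicodedata
--
-- def getmeaning(definition:str):
--     result = []
--     x = 2
--     number = str(x)+"."
--     while definition.find(number) >0:
--         found = definition.find(number)
--         result.append(unicodedata.normalize("NFC",definition[:found].replace(number, "").strip()))
--         definition=definition[found+2:]
--         x+=1
--         number = str(x)+"."
--     # for i in result:
--     result.append(unicodedata.normalize("NFC",definition.replace(str(x-1)+".", "").strip()))
--     return gettype(result)
--
-- def gettype(meaning:[str]):
--     result = []
--     for translation in meaning: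
--         if translation.lower().find("pron. ") >=0:
--             wordtype="pronombre"
--             wordtranslation	= translation[translation.lower().find("pron. ")+5:].strip()
--         elif translation.lower().find("pref. ") >=0:
--             wordtype="prefijo"
--             wordtranslation	= translation[translation.lower().find("pref. ")+5:].strip()
--         elif translation.lower().find("interj. ") >=0:
--             wordtype="interjecion"
--             wordtranslation	= translation[translation.lower().find("interj. ")+7:].strip()
--         elif translation.lower().find("adj. pos.")>=0:
--             wordtype="adjetivo posesivo"
--             wordtranslation	= translation[translation.lower().find("adj. pos.")+9:].strip()
--         elif translation.lower().find("adj.")>=0: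
--             wordtype="adjetivo"
--             wordtranslation	= translation[translation.lower().find("adj.")+4:].strip()
--         elif translation.lower().find("adv.")>=0:
--             wordtype="adverbio"
--             wordtranslation	= translation[translation.lower().find("adv.")+4:].strip()
--         elif translation.lower().find("v. ")>=0:
--             wordtype="verbo"
--             wordtranslation	= translation[translation.lower().find("v. ")+2:].strip()
--         elif translation.lower().find("conj. ")>=0:
--             wordtype="conjuncion"
--             wordtranslation	= translation[translation.lower().find("conj. ")+5:].strip()
--         elif translation.lower().find("exp. ")>=0:
--             wordtype="expresion"
--             wordtranslation	= translation[translation.lower().find("exp. ")+4:].strip()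
--         elif translation.lower().find("p. ")>=0:
--             wordtype="posposicion"
--             wordtranslation	= translation[translation.lower().find("p. ")+2:].strip()
--         elif translation.lower().find(" s. ")>=0:
--             wordtype="sustantivo"
--             wordtranslation	= translation[translation.lower().find(" s. ")+3:].strip()
--         elif translation.lower().find("s.") == 0:
--             wordtype="sustantivo"
--             wordtranslation	= translation[2:].strip()
--         else:
--             wordtype="sustantivo"
--             wordtranslation	= translation.strip()
--         result.append({"type":wordtype, "translation":wordtranslation})
--     return result
-- ===== SOURCE B (Python) =====
-- import unicodedata
--
-- # priority-ordered classification table: (needle, wordtype, offset past the needle's start)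
-- _TABLE = [
--     ("pron. ", "pronombre", 5),
--     ("pref. ", "prefijo", 5),
--     ("interj. ", "interjecion", 7),
--     ("adj. pos.", "adjetivo posesivo", 9),
--     ("adj.", "adjetivo", 4),
--     ("adv.", "adverbio", 4),
--     ("v. ", "verbo", 2),
--     ("conj. ", "conjuncion", 5),
--     ("exp. ", "expresion", 4),
--     ("p. ", "posposicion", 2),
--     (" s. ", "sustantivo", 3),
-- ]
--
-- def _classify(t):
--     """Gather every table entry occurring in t (case-insensitively) and keep the
--     highest-priority one; fall back to the leading-'s.' and default noun cases."""
--     low = t.lower()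
--     matches = [(rank, low.find(needle), off, wt)
--                for rank, (needle, wt, off) in enumerate(_TABLE)
--                if needle in low]
--     if matches:
--         rank, pos, off, wt = min(matches)
--         return {"type": wt, "translation": t[pos + off:].strip()}
--     if low.startswith("s."):
--         return {"type": "sustantivo", "translation": t[2:].strip()}
--     return {"type": "sustantivo", "translation": t.strip()}
--
-- def _go(definition, x):
--     """Recursively peel the piece before the next 'x.' marker, classifying each
--     piece as it is produced (single fused pass, no intermediate piece list)."""
--     number = str(x) + "."
--     found = definition.find(number)
--     if found <= 0:
--         return [_classify(unicodedata.normalize("NFC",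
--                     definition.replace(str(x - 1) + ".", "").strip()))]
--     head = _classify(unicodedata.normalize("NFC",
--                 definition[:found].replace(number, "").strip()))
--     return [head] + _go(definition[found + 2:], x + 1)
--
-- def getmeaning(definition: str):
--     return _go(definition, 2)
-- ===== Notes on version B (the rewrite author's own statement) =====
-- stated objective: alternative
-- what changed: B is a single recursive pass that classifies each numbered piece as it is peeled off (no intermediate piece list and no second classification loop), and classification itself collects ALL matching table needles with their priority rank and picks min(matches), instead of A's two staged passes (imperative split loop, then append-loop over a twelve-branch first-match if/elif cascade).
import Mathlib
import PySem

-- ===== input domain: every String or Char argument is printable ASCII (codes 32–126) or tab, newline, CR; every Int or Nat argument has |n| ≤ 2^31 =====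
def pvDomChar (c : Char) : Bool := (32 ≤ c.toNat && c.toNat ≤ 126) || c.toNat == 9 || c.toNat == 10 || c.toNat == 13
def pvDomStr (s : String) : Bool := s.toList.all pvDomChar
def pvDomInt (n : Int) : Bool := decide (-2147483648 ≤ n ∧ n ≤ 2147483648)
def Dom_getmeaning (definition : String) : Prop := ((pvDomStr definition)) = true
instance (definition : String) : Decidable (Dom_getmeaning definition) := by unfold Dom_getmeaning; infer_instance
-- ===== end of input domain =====

-- B is a single recursive pass classifying each numbered piece as it is peeled off, with
-- classification by collecting all matching needles and taking min(matches) by priority rank,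
-- instead of A's two staged passes (split loop, then a twelve-branch first-match cascade).
-- Objective: alternative. unicodedata.normalize("NFC", ·) is the identity on the ASCII domain
-- and is ported as such.

-- ===== PORT A =====
-- the while loop of A's getmeaning; fuel = |definition|+1 is one more than the loop can iterate
-- (each iteration strictly shortens the string), so the fuel-exhaustion branch (which performs
-- the normal loop exit) is never reached.
def pvSplit (fuel : Nat) (definition : String) (x : Int) (result : List String) : List String :=
  match fuel with
  | 0 =>
      result ++ [PySem.Str.strip (PySem.Str.replace definition (PySem.Int.toStr (x - 1) ++ ".") "")]
  | fuel + 1 =>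
      let number := PySem.Int.toStr x ++ "."
      if PySem.Str.find definition number > 0 then
        let found := PySem.Str.find definition number
        pvSplit fuel (PySem.Str.slice definition (some (found + 2)) none) (x + 1)
          (result ++ [PySem.Str.strip
            (PySem.Str.replace (PySem.Str.slice definition none (some found)) number "")])
      else
        result ++ [PySem.Str.strip (PySem.Str.replace definition (PySem.Int.toStr (x - 1) ++ ".") "")]

-- one dict of A's gettype: the literal if/elif cascade
def pvDictA (t : String) : List (String × String) :=
  if PySem.Str.find (PySem.Str.lower t) "pron. " ≥ 0 then
    [("type", "pronombre"), ("translation", PySem.Str.strip (PySem.Str.slice t (some (PySem.Str.find (PySem.Str.lower t) "pron. " + 5)) none))]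
  else if PySem.Str.find (PySem.Str.lower t) "pref. " ≥ 0 then
    [("type", "prefijo"), ("translation", PySem.Str.strip (PySem.Str.slice t (some (PySem.Str.find (PySem.Str.lower t) "pref. " + 5)) none))]
  else if PySem.Str.find (PySem.Str.lower t) "interj. " ≥ 0 then
    [("type", "interjecion"), ("translation", PySem.Str.strip (PySem.Str.slice t (some (PySem.Str.find (PySem.Str.lower t) "interj. " + 7)) none))]
  else if PySem.Str.find (PySem.Str.lower t) "adj. pos." ≥ 0 then
    [("type", "adjetivo posesivo"), ("translation", PySem.Str.strip (PySem.Str.slice t (some (PySem.Str.find (PySem.Str.lower t) "adj. pos." + 9)) none))]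
  else if PySem.Str.find (PySem.Str.lower t) "adj." ≥ 0 then
    [("type", "adjetivo"), ("translation", PySem.Str.strip (PySem.Str.slice t (some (PySem.Str.find (PySem.Str.lower t) "adj." + 4)) none))]
  else if PySem.Str.find (PySem.Str.lower t) "adv." ≥ 0 then
    [("type", "adverbio"), ("translation", PySem.Str.strip (PySem.Str.slice t (some (PySem.Str.find (PySem.Str.lower t) "adv." + 4)) none))]
  else if PySem.Str.find (PySem.Str.lower t) "v. " ≥ 0 then
    [("type", "verbo"), ("translation", PySem.Str.strip (PySem.Str.slice t (some (PySem.Str.find (PySem.Str.lower t) "v. " + 2)) none))]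
  else if PySem.Str.find (PySem.Str.lower t) "conj. " ≥ 0 then
    [("type", "conjuncion"), ("translation", PySem.Str.strip (PySem.Str.slice t (some (PySem.Str.find (PySem.Str.lower t) "conj. " + 5)) none))]
  else if PySem.Str.find (PySem.Str.lower t) "exp. " ≥ 0 then
    [("type", "expresion"), ("translation", PySem.Str.strip (PySem.Str.slice t (some (PySem.Str.find (PySem.Str.lower t) "exp. " + 4)) none))]
  else if PySem.Str.find (PySem.Str.lower t) "p. " ≥ 0 then
    [("type", "posposicion"), ("translation", PySem.Str.strip (PySem.Str.slice t (some (PySem.Str.find (PySem.Str.lower t) "p. " + 2)) none))]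
  else if PySem.Str.find (PySem.Str.lower t) " s. " ≥ 0 then
    [("type", "sustantivo"), ("translation", PySem.Str.strip (PySem.Str.slice t (some (PySem.Str.find (PySem.Str.lower t) " s. " + 3)) none))]
  else if PySem.Str.find (PySem.Str.lower t) "s." = 0 then
    [("type", "sustantivo"), ("translation", PySem.Str.strip (PySem.Str.slice t (some 2) none))]
  else
    [("type", "sustantivo"), ("translation", PySem.Str.strip t)]

-- gettype: result list built by appending inside the loop, as in A
def pvGettypeA (meaning : List String) : List (List (String × String)) :=
  meaning.foldl (fun res t => res ++ [pvDictA t]) []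

def getmeaning (definition : String) : List (List (String × String)) :=
  pvGettypeA (pvSplit (definition.toList.length + 1) definition 2 [])

-- ===== PORT B =====
-- Source B's priority-ordered table (needle, wordtype, offset)
def pvTable : List (String × String × Int) :=
  [("pron. ", "pronombre", 5), ("pref. ", "prefijo", 5), ("interj. ", "interjecion", 7),
   ("adj. pos.", "adjetivo posesivo", 9), ("adj.", "adjetivo", 4), ("adv.", "adverbio", 4),
   ("v. ", "verbo", 2), ("conj. ", "conjuncion", 5), ("exp. ", "expresion", 4),
   ("p. ", "posposicion", 2), (" s. ", "sustantivo", 3)]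

-- Source B's `matches` comprehension: all entries whose needle occurs in low, with their rank
def pvMatches (table : List (String × String × Int)) (rank : Int) (low : String) :
    List (Int × Int × Int × String) :=
  match table with
  | [] => []
  | (needle, wt, off) :: rest =>
      if PySem.Str.isIn needle low then
        (rank, PySem.Str.find low needle, off, wt) :: pvMatches rest (rank + 1) low
      else pvMatches rest (rank + 1) low

-- Source B's min(matches): ranks are pairwise distinct, so Python's lexicographic tuple minimum
-- is decided by the rank alone; ported as a fold keeping the entry of strictly smaller rank.
def pvMin (best : Int × Int × Int × String) (rest : List (Int × Int × Int × String)) :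
    Int × Int × Int × String :=
  rest.foldl (fun b e => if e.1 < b.1 then e else b) best

-- Source B's _classify
def pvDictB (t : String) : List (String × String) :=
  let low := PySem.Str.lower t
  match pvMatches pvTable 0 low with
  | m :: rest =>
      let best := pvMin m rest
      [("type", best.2.2.2),
       ("translation", PySem.Str.strip (PySem.Str.slice t (some (best.2.1 + best.2.2.1)) none))]
  | [] =>
      if PySem.Str.startswith low "s." then
        [("type", "sustantivo"), ("translation", PySem.Str.strip (PySem.Str.slice t (some 2) none))]
      else
        [("type", "sustantivo"), ("translation", PySem.Str.strip t)]

-- Source B's _go: recursive fused split-and-classify; same fuel argument as pvSplit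
def pvGo (fuel : Nat) (definition : String) (x : Int) : List (List (String × String)) :=
  match fuel with
  | 0 =>
      [pvDictB (PySem.Str.strip (PySem.Str.replace definition (PySem.Int.toStr (x - 1) ++ ".") ""))]
  | fuel + 1 =>
      let number := PySem.Int.toStr x ++ "."
      let found := PySem.Str.find definition number
      if found ≤ 0 then
        [pvDictB (PySem.Str.strip (PySem.Str.replace definition (PySem.Int.toStr (x - 1) ++ ".") ""))]
      else
        pvDictB (PySem.Str.strip (PySem.Str.replace (PySem.Str.slice definition none (some found)) number ""))
          :: pvGo fuel (PySem.Str.slice definition (some (found + 2)) none) (x + 1)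

def getmeaning_alt (definition : String) : List (List (String × String)) :=
  pvGo (definition.toList.length + 1) definition 2

-- ===== PRECONDITION & SPEC =====
def Spec_getmeaning (definition : String) (out : List (List (String × String))) : Prop := out = getmeaning_alt definition
instance (definition : String) (out : List (List (String × String))) : Decidable (Spec_getmeaning definition out) := by unfold Spec_getmeaning; infer_instance

-- ===== CLAIM =====
def Claim_equal_getmeaning : Prop := ∀ (definition : String), Dom_getmeaning definition → Spec_getmeaning definition (getmeaning definition)

-- ===== LEMMAS AND PROOFS =====
-- first-match chain over the table: the reference form both classifiers reduce to
def pvChain (table : List (String × String × Int)) (t low : String) :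
    Option (List (String × String)) :=
  match table with
  | [] => none
  | (needle, wt, off) :: rest =>
      if PySem.Str.isIn needle low then
        some [("type", wt),
              ("translation", PySem.Str.strip (PySem.Str.slice t (some (PySem.Str.find low needle + off)) none))]
      else pvChain rest t low

theorem pvMatches_rank_le (table : List (String × String × Int)) (rank : Int) (low : String) :
    ∀ e ∈ pvMatches table rank low, rank ≤ e.1 := by
  induction table generalizing rank with
  | nil => intro e he; simp [pvMatches] at he
  | cons hd tl ih =>
      intro e he
      obtain ⟨needle, wt, off⟩ := hd
      by_cases hin : PySem.Str.isIn needle low = true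
      · simp only [pvMatches, if_pos hin, List.mem_cons] at he
        rcases he with h | h
        · subst h; simp
        · exact le_trans (by omega) (ih (rank + 1) e h)
      · simp only [pvMatches, if_neg hin] at he
        exact le_trans (by omega) (ih (rank + 1) e he)

theorem pvMin_of_all_ge (best : Int × Int × Int × String)
    (rest : List (Int × Int × Int × String)) (h : ∀ e ∈ rest, best.1 ≤ e.1) :
    pvMin best rest = best := by
  induction rest with
  | nil => rfl
  | cons hd tl ih =>
      unfold pvMin
      have hb : ¬ hd.1 < best.1 := not_lt.2 (h hd (List.mem_cons_self))
      simp only [List.foldl, if_neg hb]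
      exact ih (fun e he => h e (List.mem_cons_of_mem _ he))

theorem pvMatches_eq_chain (table : List (String × String × Int)) (rank : Int) (t low : String) :
    (match pvMatches table rank low with
     | [] => none
     | m :: rest =>
         some [("type", (pvMin m rest).2.2.2),
               ("translation", PySem.Str.strip (PySem.Str.slice t (some ((pvMin m rest).2.1 + (pvMin m rest).2.2.1)) none))])
      = pvChain table t low := by
  induction table generalizing rank with
  | nil => rfl
  | cons hd tl ih =>
      obtain ⟨needle, wt, off⟩ := hd
      by_cases hin : PySem.Str.isIn needle low = true
      · have hmin : pvMin (rank, PySem.Str.find low needle, off, wt) (pvMatches tl (rank + 1) low)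
            = (rank, PySem.Str.find low needle, off, wt) := by
          apply pvMin_of_all_ge
          intro e he
          have := pvMatches_rank_le tl (rank + 1) low e he
          simp only
          omega
        simp only [pvMatches, if_pos hin, pvChain, hmin]
      · simp only [pvMatches, if_neg hin, pvChain]
        exact ih (rank + 1)

-- pvDictB computed through the chain
theorem pvDictB_eq_chain (t : String) :
    pvDictB t = (pvChain pvTable t (PySem.Str.lower t)).getD
      (if PySem.Str.startswith (PySem.Str.lower t) "s." then
        [("type", "sustantivo"), ("translation", PySem.Str.strip (PySem.Str.slice t (some 2) none))]
       else
        [("type", "sustantivo"), ("translation", PySem.Str.strip t)]) := by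
  simp only [pvDictB]
  rw [← pvMatches_eq_chain pvTable 0 t (PySem.Str.lower t)]
  cases h : pvMatches pvTable 0 (PySem.Str.lower t) <;> simp

theorem getD_ite {α : Type} (c : Prop) [Decidable c] (a d : α) (o : Option α) :
    (if c then some a else o).getD d = if c then a else o.getD d := by
  by_cases h : c <;> simp [h]

theorem find_ge_iff_isIn (low needle : String) :
    PySem.Str.isIn needle low = decide (PySem.Str.find low needle ≥ 0) := by
  by_cases h : PySem.Str.find low needle ≥ 0
  · simp only [h, decide_true]
    exact (PySem.Str.isIn_iff_infix _ _).2 ((PySem.Str.find_nonneg_iff _ _).1 h)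
  · simp only [h, decide_false]
    rw [← Bool.not_eq_true, PySem.Str.isIn_iff_infix]
    exact fun hc => h ((PySem.Str.find_nonneg_iff _ _).2 hc)

theorem startswith_eq_find_zero (s p : String) :
    PySem.Str.startswith s p = decide (PySem.Str.find s p = 0) := by
  simp only [PySem.Str.startswith_eq, PySem.Str.find_eq]
  by_cases h : p.toList <+: s.toList
  · have hge : 0 ≤ PySem.Chars.find s.toList p.toList :=
      (PySem.Chars.find_nonneg_iff _ _).2 h.isInfix
    have hspec := PySem.Chars.find_spec hge
    have hz : PySem.Chars.find s.toList p.toList = 0 := by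
      by_contra hne
      have hpos : 0 < (PySem.Chars.find s.toList p.toList).toNat := by omega
      exact hspec.2 0 hpos (by simpa using h)
    simp [(PySem.Chars.startswith_iff _ _).2 h, hz]
  · have hne : PySem.Chars.find s.toList p.toList ≠ 0 := by
      intro h0
      have hge : (0 : Int) ≤ PySem.Chars.find s.toList p.toList := by omega
      have hspec := PySem.Chars.find_spec hge
      rw [h0] at hspec
      exact h (by simpa using hspec.1)
    have hsw : PySem.Chars.startswith s.toList p.toList = false := by
      rw [← Bool.not_eq_true, PySem.Chars.startswith_iff]
      exact h
    simp [hsw, hne]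

theorem pvDictA_eq_pvDictB (t : String) : pvDictA t = pvDictB t := by
  rw [pvDictB_eq_chain]
  simp only [pvDictA, pvChain, pvTable, getD_ite, Option.getD_none, find_ge_iff_isIn,
    startswith_eq_find_zero, decide_eq_true_eq]

theorem foldl_append_eq_map (f : String → List (String × String)) (l : List String)
    (acc : List (List (String × String))) :
    l.foldl (fun res t => res ++ [f t]) acc = acc ++ l.map f := by
  induction l generalizing acc with
  | nil => simp
  | cons h tl ih => simp [List.foldl, ih]

theorem pvSplit_map_eq_pvGo (fuel : Nat) (d : String) (x : Int) (res : List String) :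
    (pvSplit fuel d x res).map pvDictA = res.map pvDictA ++ pvGo fuel d x := by
  induction fuel generalizing d x res with
  | zero => simp [pvSplit, pvGo, pvDictA_eq_pvDictB]
  | succ fuel ih =>
      simp only [pvSplit, pvGo]
      by_cases h : PySem.Str.find d (PySem.Int.toStr x ++ ".") > 0
      · have h2 : ¬ PySem.Str.find d (PySem.Int.toStr x ++ ".") ≤ 0 := by omega
        simp only [if_pos h, if_neg h2, ih]
        simp [pvDictA_eq_pvDictB]
      · have h2 : PySem.Str.find d (PySem.Int.toStr x ++ ".") ≤ 0 := by omega
        rw [if_neg h, if_pos h2]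
        simp [pvDictA_eq_pvDictB]

-- ===== VERDICT =====
theorem getmeaning_spec : Claim_equal_getmeaning := by
  intro d _
  unfold Spec_getmeaning getmeaning getmeaning_alt pvGettypeA
  rw [foldl_append_eq_map, pvSplit_map_eq_pvGo]
  simp
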